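-- pv_equiv track=rewrite | github.com/javsorbla/game-library | backend/games/tournament.py | _ms_total_comparisons
-- ===== SOURCE A (Python) =====
-- def _ms_total_comparisons(n: int) -> int:
--     if n <= 1:
--         return 0
--     total, size = 0, 1
--     while size < n:
--         for start in range(0, n, size * 2):
--             left_len  = min(size, n - start)
--             right_len = min(size, n - start - left_len)
--             if right_len > 0:
--                 total += left_len + right_len - 1
--         size *= 2
--     return total
-- ===== SOURCE B (Python) =====
-- def _ms_total_comparisons(n: int) -> int:
--     total, size = 0, 1
--     while size < n:
--         block = 2 * size
--         full, rem = divmod(n, block)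
--         total += full * (block - 1)
--         if rem > size:
--             total += rem - 1
--         size = block
--     return total
-- ===== Notes on version B (the rewrite author's own statement) =====
-- stated objective: faster
-- what changed: Replaces the per-level inner loop over all block starts by a closed form per level (full-block count times (2*size-1) plus the partial-tail term from divmod), so only O(log n) levels of O(1) work remain.
import Mathlib
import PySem

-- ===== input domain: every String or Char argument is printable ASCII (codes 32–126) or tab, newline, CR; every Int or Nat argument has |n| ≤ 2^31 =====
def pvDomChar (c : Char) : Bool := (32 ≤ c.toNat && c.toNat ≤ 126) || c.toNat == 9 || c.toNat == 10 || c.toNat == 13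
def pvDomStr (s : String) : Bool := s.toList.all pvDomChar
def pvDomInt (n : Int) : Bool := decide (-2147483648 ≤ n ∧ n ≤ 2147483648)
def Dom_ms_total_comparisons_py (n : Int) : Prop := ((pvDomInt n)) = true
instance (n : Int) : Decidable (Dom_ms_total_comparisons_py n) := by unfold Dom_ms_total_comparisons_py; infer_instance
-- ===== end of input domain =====

-- B replaces A's per-level inner loop over all block starts by a divmod closed form per level (O(log n) vs O(n)); objective: faster.


-- ===== PORT A =====
-- body of A's inner for-loop (start runs over range(0, n, size*2))
def msStepA (n s : Int) (acc start : Int) : Int :=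
  let left_len := min s (n - start)
  let right_len := min s (n - start - left_len)
  if right_len > 0 then acc + (left_len + right_len - 1) else acc

-- A's while-loop; hs (size stays positive) is needed only for termination
def msLoopA (n total size : Int) (hs : 0 < size) : Int :=
  if h : size < n then
    msLoopA n ((PySem.List.pyRange 0 n (size * 2)).foldl (msStepA n size) total) (size * 2)
      (by omega)
  else total
termination_by (n - size).toNat
decreasing_by omega

def ms_total_comparisons_py (n : Int) : Int :=
  if n ≤ 1 then 0 else msLoopA n 0 1 (by norm_num)

-- ===== PORT B =====
-- B's while-loop: per level, full = n // block blocks of 2*size cost block-1 each,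
-- plus the partial tail rem = n % block, which costs rem-1 iff rem > size
def msLoopB (n total size : Int) (hs : 0 < size) : Int :=
  if h : size < n then
    let block := 2 * size
    let full := PySem.Int.floordiv n block
    let rem := PySem.Int.mod n block
    msLoopB n (total + full * (block - 1) + (if rem > size then rem - 1 else 0)) block
      (by omega)
  else total
termination_by (n - size).toNat
decreasing_by omega

def ms_total_comparisons_py_alt (n : Int) : Int := msLoopB n 0 1 (by norm_num)

-- ===== PRECONDITION & SPEC =====
def Spec_ms_total_comparisons_py (n : Int) (out : Int) : Prop := out = ms_total_comparisons_py_alt n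
instance (n : Int) (out : Int) : Decidable (Spec_ms_total_comparisons_py n out) := by unfold Spec_ms_total_comparisons_py; infer_instance

-- ===== CLAIM (what is proved, stated in full; the proofs are below) =====
def Claim_equal_ms_total_comparisons_py : Prop := ∀ (n : Int), Dom_ms_total_comparisons_py n → Spec_ms_total_comparisons_py n (ms_total_comparisons_py n)

-- ===== LEMMAS AND PROOFS =====

-- pyRange with a positive step: cons and nil forms
theorem pyRange_pos_nil (a b k : Int) (hk : 0 < k) (h : b ≤ a) :
    PySem.List.pyRange a b k = [] := by
  rw [PySem.List.pyRange_of_pos a b hk]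
  simp [show ¬ a < b by omega]

theorem pyRange_pos_cons (a b k : Int) (hk : 0 < k) (h : a < b) :
    PySem.List.pyRange a b k = a :: PySem.List.pyRange (a + k) b k := by
  rw [PySem.List.pyRange_of_pos a b hk, PySem.List.pyRange_of_pos (a + k) b hk]
  have hq : (0:Int) ≤ (b - a - 1) / k := Int.ediv_nonneg (by omega) (by omega)
  have hcnt : ((b - a + k - 1) / k).toNat = ((b - a - 1) / k).toNat + 1 := by
    have h1 : (b - a + k - 1) / k = (b - a - 1) / k + 1 := by
      have := Int.add_mul_ediv_right (b - a - 1) 1 (show k ≠ 0 by omega)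
      rw [show b - a + k - 1 = b - a - 1 + 1 * k by ring, this]
    rw [h1, Int.toNat_add hq (by norm_num)]
    rfl
  have hcnt2 : (if a + k < b then ((b - (a + k) + k - 1) / k).toNat else 0)
      = ((b - a - 1) / k).toNat := by
    by_cases h2 : a + k < b
    · rw [if_pos h2]; congr 2; ring
    · rw [if_neg h2]
      have : (b - a - 1) / k = 0 := Int.ediv_eq_zero_of_lt (by omega) (by omega)
      simp [this]
  rw [if_pos h, hcnt, hcnt2, List.range_succ_eq_map]
  simp only [List.map_cons, List.map_map]
  congr 1
  · simp
  · apply List.map_congr_left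
    intro x _
    simp [Function.comp]
    ring

-- the per-level closed form: folding A's step over range(a, n, s*2) adds
-- ((n-a) / (2s)) * (2s-1) plus the tail term
theorem inner_fold (n s : Int) (hs : 0 < s) (a t : Int) (ha : a < n) :
    (PySem.List.pyRange a n (s * 2)).foldl (msStepA n s) t
      = t + (n - a) / (2 * s) * (2 * s - 1)
          + (if s < (n - a) % (2 * s) then (n - a) % (2 * s) - 1 else 0) := by
  have hk : (0:Int) < s * 2 := by omega
  rw [pyRange_pos_cons a n (s * 2) hk ha, List.foldl_cons]
  by_cases hrec : a + s * 2 < n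
  · rw [inner_fold n s hs (a + s * 2) (msStepA n s t a) hrec]
    have hm : 2 * s < n - a := by omega
    have hstep : msStepA n s t a = t + (2 * s - 1) := by
      simp only [msStepA]
      split_ifs <;> omega
    have hdiv : (n - a) / (2 * s) = (n - a - 2 * s) / (2 * s) + 1 := by
      conv_lhs => rw [show n - a = n - a - 2 * s + 1 * (2 * s) by ring]
      exact Int.add_mul_ediv_right _ _ (by omega)
    have hmod : (n - a) % (2 * s) = (n - a - 2 * s) % (2 * s) := by
      conv_lhs => rw [show n - a = n - a - 2 * s + 2 * s * 1 by ring]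
      exact Int.add_mul_emod_self_left _ _ _
    rw [hstep, hdiv, hmod, show n - (a + s * 2) = n - a - 2 * s by ring]
    ring
  · rw [pyRange_pos_nil (a + s * 2) n (s * 2) hk (by omega), List.foldl_nil]
    have hm0 : 0 < n - a := by omega
    have hm2 : n - a ≤ 2 * s := by omega
    by_cases heq : n - a = 2 * s
    · have hdiv : (n - a) / (2 * s) = 1 := by rw [heq]; exact Int.ediv_self (by omega)
      have hmod : (n - a) % (2 * s) = 0 := by rw [heq]; exact Int.emod_self
      rw [hdiv, hmod]
      simp only [msStepA]
      split_ifs <;> omega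
    · have hmlt : n - a < 2 * s := by omega
      have hdiv : (n - a) / (2 * s) = 0 := Int.ediv_eq_zero_of_lt (by omega) hmlt
      have hmod : (n - a) % (2 * s) = n - a := Int.emod_eq_of_lt (by omega) hmlt
      rw [hdiv, hmod]
      simp only [msStepA]
      split_ifs <;> omega
termination_by (n - a).toNat
decreasing_by omega

theorem loop_eq (n : Int) (size : Int) (hs : 0 < size) (total : Int) :
    msLoopA n total size hs = msLoopB n total size hs := by
  rw [msLoopA, msLoopB]
  by_cases h : size < n
  · rw [dif_pos h, dif_pos h]
    rw [inner_fold n size hs 0 total (by omega)]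
    rw [loop_eq n (size * 2) (by omega) _]
    have hb : size * 2 = 2 * size := by ring
    simp only [PySem.Int.floordiv_eq_ediv_of_pos (show (0:Int) < 2 * size by omega),
      PySem.Int.mod_eq_emod_of_pos (show (0:Int) < 2 * size by omega), sub_zero, hb]
  · rw [dif_neg h, dif_neg h]
termination_by (n - size).toNat
decreasing_by omega

-- ===== VERDICT (by name: the statement is the Claim_ definition above) =====
theorem ms_total_comparisons_py_spec : Claim_equal_ms_total_comparisons_py := by
  intro n _
  unfold Spec_ms_total_comparisons_py ms_total_comparisons_py ms_total_comparisons_py_alt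
  by_cases h : n ≤ 1
  · rw [if_pos h, msLoopB, dif_neg (by omega)]
  · rw [if_neg h, loop_eq]
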